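-- pv_equiv track=rewrite | github.com/paolovasquezg/bdii_project | backend/catalog/ddl.py | get_table_descp
-- ===== SOURCE A (Python) =====
-- def get_table_descp(relation: dict, indexes: dict):
--
--     fields = []
--
--     for key in relation:
--
--         field = relation[key]
--
--         field["name"] = key
--
--         fields.append(field)
--
--     for index in indexes:
--
--         if index != "primary":
--
--             for i in range(len(fields)):
--
--                 if index == fields[i]["name"]:
--                     fields[i]["index"] = indexes[index]["index"]
--
--     return fields
-- ===== SOURCE B (Python) =====
-- # Single pass over relation: tag each field with its name and attach its index
-- # info immediately via a dict membership test (no separate nested matching loop).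
-- # Like A, mutates the field dicts in place; return-value equivalence is what is claimed.
-- def get_table_descp(relation: dict, indexes: dict):
--     fields = []
--     for key, field in relation.items():
--         field["name"] = key
--         if key in indexes and key != "primary":
--             field["index"] = indexes[key]["index"]
--         fields.append(field)
--     return fields
-- ===== Notes on version B (the rewrite author's own statement) =====
-- stated objective: simpler
-- what changed: A builds the fields list, then for each index key rescans the whole fields list by position to find the matching name; B does one combined pass over relation, attaching the index info by a direct dict membership/lookup, so the nested positional matching loop disappears.
import Mathlib
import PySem

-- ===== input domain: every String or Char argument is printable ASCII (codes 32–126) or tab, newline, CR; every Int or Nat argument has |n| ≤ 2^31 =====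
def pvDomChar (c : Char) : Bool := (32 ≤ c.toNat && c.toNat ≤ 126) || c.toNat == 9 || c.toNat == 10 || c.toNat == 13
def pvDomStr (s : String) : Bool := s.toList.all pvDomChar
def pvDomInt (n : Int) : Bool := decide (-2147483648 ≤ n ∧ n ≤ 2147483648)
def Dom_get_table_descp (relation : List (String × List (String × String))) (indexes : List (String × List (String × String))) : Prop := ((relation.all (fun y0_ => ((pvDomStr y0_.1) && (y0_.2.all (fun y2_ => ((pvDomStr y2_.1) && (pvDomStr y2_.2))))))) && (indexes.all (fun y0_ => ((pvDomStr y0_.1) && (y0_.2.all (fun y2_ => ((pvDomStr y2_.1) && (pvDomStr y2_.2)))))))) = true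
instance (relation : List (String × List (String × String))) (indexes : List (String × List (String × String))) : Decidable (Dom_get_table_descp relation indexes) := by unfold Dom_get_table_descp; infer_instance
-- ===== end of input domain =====

-- B changes the structure (one combined pass, direct dict lookup instead of a nested
-- positional rescan); like A it mutates the field dicts in place in Python — the
-- equivalence proved here is about the RETURN value.

-- ===== PORT A =====
-- A: build fields (each value dict with "name" set), then for every non-"primary"
-- index key rescan fields by position and set "index" on the matching field.
def get_table_descp (relation : List (String × List (String × String))) (indexes : List (String × List (String × String))) : List (List (String × String)) :=
  let rd := PySem.Dict.ofList relation
  let id := PySem.Dict.ofList indexes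
  let fields : List (PySem.Dict String String) :=
    rd.keys.foldl (fun fs key =>
      let field := PySem.Dict.ofList (rd.getD key [])
      let field := field.insert "name" key
      fs ++ [field]) []
  let fields :=
    id.keys.foldl (fun fs index =>
      if index ≠ "primary" then
        (List.range fs.length).foldl (fun fs i =>
          -- fields[i]: i ranges over range(len(fields)), so the getD default is never used
          let f := fs.getD i (PySem.Dict.mk [])
          if index = f.getD "name" "" then
            -- indexes[index]["index"]; KeyError (= missing "index") excluded by Pre_
            fs.set i (f.insert "index" ((PySem.Dict.ofList (id.getD index [])).getD "index" ""))
          else fs) fs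
      else fs) fields
  fields.map PySem.Dict.items

-- ===== PORT B =====
-- B: one pass over relation.items(); attach "name" and, if the key has a
-- non-"primary" index entry, attach "index" immediately.
def get_table_descp_alt (relation : List (String × List (String × String))) (indexes : List (String × List (String × String))) : List (List (String × String)) :=
  let rd := PySem.Dict.ofList relation
  let id := PySem.Dict.ofList indexes
  rd.items.foldl (fun fs kv =>
    let field := (PySem.Dict.ofList kv.2).insert "name" kv.1
    let field :=
      if id.contains kv.1 && kv.1 != "primary" then
        field.insert "index" ((PySem.Dict.ofList (id.getD kv.1 [])).getD "index" "")
      else field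
    fs ++ [field.items]) []

-- ===== PRECONDITION & SPEC =====
-- Pre_ excludes exactly the inputs where Python A raises KeyError: a non-"primary"
-- index key that names an existing relation field but whose entry lacks "index".
def Pre_get_table_descp (relation : List (String × List (String × String))) (indexes : List (String × List (String × String))) : Prop :=
  ∀ k ∈ (PySem.Dict.ofList indexes).keys, k ≠ "primary" →
    k ∈ (PySem.Dict.ofList relation).keys →
      (PySem.Dict.ofList ((PySem.Dict.ofList indexes).getD k [])).contains "index" = true
instance (relation : List (String × List (String × String))) (indexes : List (String × List (String × String))) : Decidable (Pre_get_table_descp relation indexes) := by unfold Pre_get_table_descp; infer_instance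
def pvWitness_get_table_descp : (List (String × List (String × String))) × (List (String × List (String × String))) :=
  ([("id", [("type", "int")]), ("nm", [("type", "str")])], [("id", [("index", "btree")]), ("primary", [("key", "id")])])

def Spec_get_table_descp (relation : List (String × List (String × String))) (indexes : List (String × List (String × String))) (out : List (List (String × String))) : Prop := out = get_table_descp_alt relation indexes
instance (relation : List (String × List (String × String))) (indexes : List (String × List (String × String))) (out : List (List (String × String))) : Decidable (Spec_get_table_descp relation indexes out) := by unfold Spec_get_table_descp; infer_instance

-- ===== CLAIM (what is proved, stated in full; the proofs are below) =====
def Claim_equal_get_table_descp : Prop := ∀ (relation : List (String × List (String × String))) (indexes : List (String × List (String × String))), Dom_get_table_descp relation indexes → Pre_get_table_descp relation indexes → Spec_get_table_descp relation indexes (get_table_descp relation indexes)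

-- ===== LEMMAS AND PROOFS =====

-- a foldl that only appends one mapped element per step is a map
theorem pv_foldl_append_map {α β : Type} (g : β → α) :
    ∀ (l : List β) (init : List α),
      l.foldl (fun fs x => fs ++ [g x]) init = init ++ l.map g := by
  intro l
  induction l with
  | nil => intro init; simp
  | cons x xs ih => intro init; simp [List.foldl, ih]

-- the positional update loop over range(len fs) is an element-wise map
theorem pv_set_loop {α : Type} (p : α → Prop) [DecidablePred p] (g : α → α) (d0 : α) :
    ∀ (suf pre : List α),
      (List.range' pre.length suf.length).foldl
        (fun fs i =>
          let f := fs.getD i d0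
          if p f then fs.set i (g f) else fs) (pre ++ suf)
      = pre ++ suf.map (fun f => if p f then g f else f) := by
  intro suf
  induction suf with
  | nil => intro pre; simp
  | cons f rest ih =>
    intro pre
    have hget : (pre ++ f :: rest).getD pre.length d0 = f := by
      simp [List.getD]
    simp only [List.length_cons, List.range'_succ, List.foldl_cons, hget]
    by_cases hp : p f
    · have hset : (pre ++ f :: rest).set pre.length (g f) = (pre ++ [g f]) ++ rest := by
        simp [List.set_append_right, List.append_assoc]
      simp only [if_pos hp, hset]
      rw [show pre.length + 1 = (pre ++ [g f]).length by simp]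
      rw [ih (pre ++ [g f])]
      simp [hp]
    · simp only [if_neg hp]
      rw [show (pre ++ f :: rest) = (pre ++ [f]) ++ rest by simp]
      rw [show pre.length + 1 = (pre ++ [f]).length by simp]
      rw [ih (pre ++ [f])]
      simp [hp]

-- folding a list of maps = mapping the pointwise fold
theorem pv_foldl_map_comm {α β : Type} (h : β → α → α) :
    ∀ (l : List β) (fs : List α),
      l.foldl (fun fs b => fs.map (h b)) fs = fs.map (fun f => l.foldl (fun f b => h b f) f) := by
  intro l
  induction l with
  | nil => intro fs; simp
  | cons b bs ih => intro fs; simp [List.foldl, ih, List.map_map, Function.comp]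

-- range-based corollary of pv_set_loop (pre = [])
theorem pv_set_loop0 {α : Type} (p : α → Prop) [DecidablePred p] (g : α → α) (d0 : α) (fs : List α) :
    (List.range fs.length).foldl
      (fun fs i =>
        let f := fs.getD i d0
        if p f then fs.set i (g f) else fs) fs
    = fs.map (fun f => if p f then g f else f) := by
  have h := pv_set_loop p g d0 fs []
  simpa [List.range_eq_range'] using h

-- the inner positional scan of A, as a map
theorem pv_inner_loop (index v : String) (fs : List (PySem.Dict String String)) :
    (List.range fs.length).foldl
      (fun fs i =>
        let f := fs.getD i (PySem.Dict.mk [])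
        if index = f.getD "name" "" then fs.set i (f.insert "index" v) else fs) fs
    = fs.map (fun f => if index = f.getD "name" "" then f.insert "index" v else f) := by
  exact pv_set_loop0 (p := fun f => index = f.getD "name" "") (g := fun f => f.insert "index" v)
    (PySem.Dict.mk []) fs

-- if no key of l equals the field's name, the pointwise fold does nothing
theorem pv_ptfold_none (val : String → String) (k : String) :
    ∀ (l : List String) (f : PySem.Dict String String), f.getD "name" "" = k → k ∉ l →
      l.foldl (fun f idx => if idx ≠ "primary" then (if idx = f.getD "name" "" then f.insert "index" (val idx) else f) else f) f = f := by
  intro l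
  induction l with
  | nil => intro f _ _; rfl
  | cons x xs ih =>
    intro f hf hk
    have hxk : x ≠ k := fun h => hk (h ▸ List.mem_cons_self)
    have hstep : (if x ≠ "primary" then (if x = f.getD "name" "" then f.insert "index" (val x) else f) else f) = f := by
      by_cases hx : x ≠ "primary"
      · rw [if_pos hx, if_neg (by rw [hf]; exact hxk)]
      · rw [if_neg hx]
    simp only [List.foldl_cons, hstep]
    exact ih f hf (fun h => hk (List.mem_cons_of_mem _ h))

-- the pointwise fold over distinct index keys attaches "index" exactly once
theorem pv_ptfold (val : String → String) (k : String) :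
    ∀ (l : List String) (f : PySem.Dict String String), l.Nodup → f.getD "name" "" = k →
      l.foldl (fun f idx => if idx ≠ "primary" then (if idx = f.getD "name" "" then f.insert "index" (val idx) else f) else f) f
      = if k ∈ l ∧ k ≠ "primary" then f.insert "index" (val k) else f := by
  intro l
  induction l with
  | nil => intro f _ _; simp
  | cons x xs ih =>
    intro f hnd hf
    rcases List.nodup_cons.mp hnd with ⟨hx_nmem, hnd'⟩
    simp only [List.foldl_cons]
    by_cases hcond : x ≠ "primary" ∧ x = k
    · rcases hcond with ⟨hxp, hxk⟩
      subst hxk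
      rw [if_pos hxp, if_pos hf.symm]
      have hf' : (f.insert "index" (val x)).getD "name" "" = x := by
        rw [PySem.Dict.getD_insert_of_ne f (val x) "" (by decide : ("name" : String) ≠ "index"), hf]
      rw [pv_ptfold_none val x xs _ hf' hx_nmem]
      rw [if_pos ⟨List.mem_cons_self, hxp⟩]
    · have hstep : (if x ≠ "primary" then (if x = f.getD "name" "" then f.insert "index" (val x) else f) else f) = f := by
        by_cases hxp : x ≠ "primary"
        · rw [if_pos hxp, if_neg (by rw [hf]; exact fun h => hcond ⟨hxp, h⟩)]
        · rw [if_neg hxp]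
      rw [hstep, ih f hnd' hf]
      by_cases hmem : k ∈ xs ∧ k ≠ "primary"
      · rw [if_pos hmem, if_pos ⟨List.mem_cons_of_mem _ hmem.1, hmem.2⟩]
      · rw [if_neg hmem]
        rw [if_neg (fun h => ?_)]
        rcases h with ⟨hmem', hkp⟩
        rcases List.mem_cons.mp hmem' with h | h
        · exact hcond ⟨h ▸ hkp, h.symm⟩
        · exact hmem ⟨h, hkp⟩

theorem get_table_descp_spec : Claim_equal_get_table_descp := by
  intro relation indexes _ _
  unfold Spec_get_table_descp get_table_descp get_table_descp_alt
  simp only [pv_inner_loop]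
  rw [pv_foldl_append_map, pv_foldl_append_map, List.nil_append, List.nil_append]
  have hmapform : ∀ (index : String) (fs : List (PySem.Dict String String)),
      (if index ≠ "primary" then
        fs.map (fun f => if index = f.getD "name" "" then
          f.insert "index" ((PySem.Dict.ofList ((PySem.Dict.ofList indexes).getD index [])).getD "index" "") else f)
      else fs)
      = fs.map (fun f => if index ≠ "primary" then (if index = f.getD "name" "" then
          f.insert "index" ((PySem.Dict.ofList ((PySem.Dict.ofList indexes).getD index [])).getD "index" "") else f) else f) := by
    intro index fs
    by_cases hx : index ≠ "primary" <;> simp [hx]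
  simp only [hmapform]
  rw [pv_foldl_map_comm]
  rw [List.map_map, List.map_map]
  rw [PySem.Dict.items_eq_map_keys (PySem.Dict.ofList relation) (PySem.Dict.nodup_keys_ofList relation) []]
  rw [List.map_map]
  apply List.map_congr_left
  intro k _
  simp only [Function.comp]
  rw [pv_ptfold _ k (PySem.Dict.keys (PySem.Dict.ofList indexes)) _
      (PySem.Dict.nodup_keys_ofList indexes)
      (PySem.Dict.getD_insert_self _ _ _ _)]
  by_cases hc : k ∈ (PySem.Dict.ofList indexes).keys ∧ k ≠ "primary"
  · rw [if_pos hc]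
    rw [if_pos (by
      rw [PySem.Dict.contains_eq_decide_mem_keys]
      simp [hc.1, hc.2, bne_iff_ne])]
  · rw [if_neg hc]
    rw [if_neg (by
      rw [PySem.Dict.contains_eq_decide_mem_keys]
      intro h
      simp only [Bool.and_eq_true, decide_eq_true_eq, bne_iff_ne] at h
      exact hc h)]
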